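-- pv_equiv track=rewrite | github.com/charm-lab/social_multiobject_tracking | multi_tracking.py | findInvalidSets
-- ===== SOURCE A (Python) =====
-- import itertools
--
-- def findInvalidSets(time_vertex_boxes):
--     invalid_sets = []
--     for time in range(len(time_vertex_boxes)):
--         vertex_boxes = time_vertex_boxes[time]
--         # these are trajectory indices
--         nonempty_indices = [index for index in range(len(vertex_boxes)) if len(vertex_boxes[index]) > 0]
--
--         for i in range(len(nonempty_indices)+1):
--             #all combinations of i nonempty_indices
--             combinations = itertools.combinations(nonempty_indices, i)
--             for combination in list(combinations):
--                 # if we already know this set is bad EVER, skip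
--                 if set(combination) in invalid_sets:
--                     continue
--                 current_test = [vertex_boxes[i] for i in combination]
--                 if not bipartiteCover(current_test):
--                     invalid_sets.append(set(combination))
--     return invalid_sets
--
-- def bipartiteCover(bounding_box_sets):
--     for i in range(1, len(bounding_box_sets)+1):
--         combinations = itertools.combinations(bounding_box_sets, i)
--         for combination in combinations:
--             combined_set = set([])
--             # box_set is actually the tactors
--
--             for box_set in combination:
--                 combined_set = combined_set | box_set
--             if len(combined_set) < i:
--                 return False
--     return True
-- ===== SOURCE B (Python) =====
-- import itertools
--
-- def findInvalidSets(time_vertex_boxes):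
--     # Hall's condition is monotone: a family fails to have a system of distinct
--     # representatives iff it contains a "direct violator" (a subfamily whose union is
--     # smaller than its size).  Since combinations are enumerated in increasing size,
--     # every proper sub-combination has already been tested, so one union computation
--     # plus a scan of the direct violators found so far replaces A's 2^k inner loop.
--     invalid_sets = []
--     known = set()                     # frozensets mirroring invalid_sets
--     for vertex_boxes in time_vertex_boxes:
--         nonempty_indices = [i for i in range(len(vertex_boxes)) if len(vertex_boxes[i]) > 0]
--         violators = []                # direct violators found this timestep
--         for size in range(len(nonempty_indices) + 1):
--             for comb in itertools.combinations(nonempty_indices, size):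
--                 fs = frozenset(comb)
--                 union = set()
--                 for i in comb:
--                     union = union | vertex_boxes[i]
--                 direct = len(union) < len(comb)
--                 bad = direct or any(v <= fs for v in violators)
--                 if direct:
--                     violators.append(fs)
--                 if bad and fs not in known:
--                     known.add(fs)
--                     invalid_sets.append(set(comb))
--     return invalid_sets
-- ===== Notes on version B (the rewrite author's own statement) =====
-- stated objective: faster
-- what changed: bipartiteCover's 2^k enumeration of all subfamilies is replaced by one union-size check plus a scan of the direct Hall violators already found this timestep (Hall's condition is monotone, and smaller combinations are enumerated first), with a set of frozensets replacing the linear list-membership test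
import Mathlib
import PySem

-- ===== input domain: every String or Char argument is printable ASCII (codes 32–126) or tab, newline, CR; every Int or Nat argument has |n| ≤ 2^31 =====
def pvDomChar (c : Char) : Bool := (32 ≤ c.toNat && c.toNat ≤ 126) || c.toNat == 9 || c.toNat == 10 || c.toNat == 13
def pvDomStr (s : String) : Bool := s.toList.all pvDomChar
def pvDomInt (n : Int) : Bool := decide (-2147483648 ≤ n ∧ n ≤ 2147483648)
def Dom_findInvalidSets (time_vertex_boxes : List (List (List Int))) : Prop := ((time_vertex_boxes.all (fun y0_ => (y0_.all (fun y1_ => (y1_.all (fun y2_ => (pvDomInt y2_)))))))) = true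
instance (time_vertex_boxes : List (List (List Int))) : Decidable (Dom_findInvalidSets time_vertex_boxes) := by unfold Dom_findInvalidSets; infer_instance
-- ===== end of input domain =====

-- B replaces A's exponential per-combination bipartiteCover (all 2^k subfamilies) by one
-- union-size check plus a scan of the direct Hall violators already recorded this timestep,
-- and a frozenset set for the global dedup test; measured much faster on large inputs.


-- ===== PORT A =====
-- combined_set = set([]); for box_set in combination: combined_set = combined_set | box_set
def pvUnionAll (combination : List (List Int)) : PySem.Set Int :=
  combination.foldl (fun combined_set box_set => PySem.Set.union combined_set box_set) PySem.Set.empty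

-- 'for i in range(1, len+1): for combination in combinations(…, i): if …: return False; return True'
-- (a pure early-return double loop, ported as !any/any; range(1,len+1) indexed by j+1, j ∈ range(len))
def bipartiteCover (bounding_box_sets : List (List Int)) : Bool :=
  !((List.range bounding_box_sets.length).any (fun j =>
    (PySem.List.combinations bounding_box_sets (j+1)).any (fun combination =>
      decide ((pvUnionAll combination).length < j+1))))

-- 'set(combination) in invalid_sets' / 'invalid_sets.append(set(combination))': every stored value is
-- set(c) = PySem.Set.ofList c for a strictly increasing combination c, on which Python's set equality
-- coincides with list equality (BEq), so List.contains is exact here.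
def findInvalidSets (time_vertex_boxes : List (List (List Int))) : List (List Int) :=
  time_vertex_boxes.foldl (fun invalid_sets vertex_boxes =>
    let nonempty_indices :=
      (PySem.List.pyRange 0 vertex_boxes.length 1).filter
        (fun index => 0 < (PySem.List.pyGetD vertex_boxes index []).length)
    (List.range (nonempty_indices.length + 1)).foldl (fun invalid_sets i =>
      (PySem.List.combinations nonempty_indices i).foldl (fun invalid_sets combination =>
        if invalid_sets.contains (PySem.Set.ofList combination) then invalid_sets
        else if !bipartiteCover (combination.map (fun i => PySem.List.pyGetD vertex_boxes i [])) then
          invalid_sets ++ [PySem.Set.ofList combination]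
        else invalid_sets) invalid_sets) invalid_sets) []

-- ===== PORT B =====
-- union = set(); for i in comb: union = union | vertex_boxes[i]
def pvUnionIdx (vertex_boxes : List (List Int)) (comb : List Int) : PySem.Set Int :=
  comb.foldl (fun union i => PySem.Set.union union (PySem.List.pyGetD vertex_boxes i [])) PySem.Set.empty

-- state: (invalid_sets, known, violators); 'known.add(fs)' happens only under 'fs not in known',
-- where Python's set.add is exactly the append; frozenset/set equality = list equality as above.
def findInvalidSets_alt (time_vertex_boxes : List (List (List Int))) : List (List Int) :=
  (time_vertex_boxes.foldl (fun st vertex_boxes =>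
    let nonempty_indices :=
      (PySem.List.pyRange 0 vertex_boxes.length 1).filter
        (fun i => 0 < (PySem.List.pyGetD vertex_boxes i []).length)
    let st2 := (List.range (nonempty_indices.length + 1)).foldl (fun st2 size =>
      (PySem.List.combinations nonempty_indices size).foldl (fun st2 comb =>
        let fs := PySem.Set.ofList comb
        let direct := decide ((pvUnionIdx vertex_boxes comb).length < comb.length)
        let bad := direct || st2.2.2.any (fun v => PySem.Set.issubset v fs)
        let violators := if direct then st2.2.2 ++ [fs] else st2.2.2
        if bad && !(st2.2.1.contains fs) then
          (st2.1 ++ [fs], st2.2.1 ++ [fs], violators)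
        else (st2.1, st2.2.1, violators)) st2) (st.1, st.2, ([] : List (List Int)))
    (st2.1, st2.2.1)) (([] : List (List Int)), ([] : List (List Int)))).1

-- ===== PRECONDITION & SPEC =====
def Spec_findInvalidSets (time_vertex_boxes : List (List (List Int))) (out : List (List Int)) : Prop := out = findInvalidSets_alt time_vertex_boxes
instance (time_vertex_boxes : List (List (List Int))) (out : List (List Int)) : Decidable (Spec_findInvalidSets time_vertex_boxes out) := by unfold Spec_findInvalidSets; infer_instance

-- ===== CLAIM (what is proved, stated in full; the proofs are below) =====
def Claim_equal_findInvalidSets : Prop := ∀ (time_vertex_boxes : List (List (List Int))), Dom_findInvalidSets time_vertex_boxes → Spec_findInvalidSets time_vertex_boxes (findInvalidSets time_vertex_boxes)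

-- ===== LEMMAS AND PROOFS =====

-- a subset of a strictly sorted list is a sublist of it
theorem pvSublist_of_subset_sorted : ∀ (c v : List Int), v.Pairwise (· < ·) → c.Pairwise (· < ·) →
    (∀ x ∈ v, x ∈ c) → v.Sublist c := by
  intro c
  induction c with
  | nil =>
    intro v _ _ hsub
    cases v with
    | nil => exact List.Sublist.refl _
    | cons a v' => exact absurd (hsub a (by simp)) (by simp)
  | cons b c' ih =>
    intro v hv hc hsub
    cases v with
    | nil => exact List.nil_sublist _
    | cons a v' =>
      rw [List.pairwise_cons] at hv hc
      by_cases hab : a = b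
      · subst hab
        refine List.Sublist.cons₂ a (ih v' hv.2 hc.2 ?_)
        intro x hx
        have hax : a < x := hv.1 x hx
        rcases List.mem_cons.mp (hsub x (List.mem_cons_of_mem _ hx)) with h | h
        · exact absurd (h ▸ hax) (lt_irrefl x)
        · exact h
      · have hac' : a ∈ c' := by
          rcases List.mem_cons.mp (hsub a List.mem_cons_self) with h | h
          · exact absurd h hab
          · exact h
        have hba : b < a := hc.1 a hac'
        refine List.Sublist.cons b (ih (a :: v') (List.pairwise_cons.mpr hv) hc.2 ?_)
        intro x hx
        rcases List.mem_cons.mp (hsub x hx) with h | h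
        · -- x = b : impossible, since a ≤ x but b < a
          exfalso
          rcases List.mem_cons.mp hx with h2 | hx'
          · exact hab (h2.symm.trans h)
          · have := hv.1 x hx'
            subst h
            omega
        · exact h

-- bipartiteCover fails iff some nonempty subfamily has a union smaller than itself
theorem pvCover_false_iff (bbs : List (List Int)) :
    bipartiteCover bbs = false ↔
      ∃ T, T.Sublist bbs ∧ T ≠ [] ∧ (pvUnionAll T).length < T.length := by
  unfold bipartiteCover
  simp only [Bool.not_eq_false', List.any_eq_true, List.mem_range,
    PySem.List.mem_combinations_iff, decide_eq_true_eq]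
  constructor
  · rintro ⟨j, hj, T, ⟨hs, hl⟩, hu⟩
    exact ⟨T, hs, by intro h; subst h; simp at hl, by rw [hl]; exact hu⟩
  · rintro ⟨T, hs, hne, hu⟩
    have h1 : 1 ≤ T.length := by
      cases T with
      | nil => exact absurd rfl hne
      | cons x t => simp
    refine ⟨T.length - 1, ?_, T, ⟨hs, by omega⟩, by omega⟩
    have := hs.length_le
    omega

theorem pvUnionAll_map (vb : List (List Int)) (c : List Int) :
    pvUnionAll (c.map (fun i => PySem.List.pyGetD vb i [])) = pvUnionIdx vb c := by
  simp [pvUnionAll, pvUnionIdx, List.foldl_map]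

-- the per-combination decision: A's Hall test equals B's direct-or-known-violator test
theorem pvBad_iff (vb : List (List Int)) (ne : List Int) (hne : ne.Pairwise (· < ·))
    (V : List (List Int)) (i : Nat)
    (hV : ∀ v ∈ V, v.Sublist ne ∧ (pvUnionIdx vb v).length < v.length)
    (hcomp : ∀ c, c.Sublist ne → (pvUnionIdx vb c).length < c.length → c.length < i → c ∈ V)
    (comb : List Int) (hc : comb.Sublist ne) (hlen : comb.length = i) :
    (bipartiteCover (comb.map (fun j => PySem.List.pyGetD vb j [])) = false) ↔
      ((pvUnionIdx vb comb).length < comb.length ∨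
        ∃ v ∈ V, PySem.Set.issubset v comb = true) := by
  rw [pvCover_false_iff]
  constructor
  · rintro ⟨T, hs, hTne, hu⟩
    rcases List.sublist_map_iff.mp hs with ⟨c', hc', rfl⟩
    rw [pvUnionAll_map, List.length_map] at hu
    by_cases hlc : c'.length = comb.length
    · left
      have : c' = comb := hc'.eq_of_length_le (le_of_eq hlc.symm)
      rw [← this]
      exact hu
    · right
      have hlt : c'.length < i := by
        have := hc'.length_le; omega
      have hmem := hcomp c' (hc'.trans hc) hu hlt
      exact ⟨c', hmem, (PySem.Set.issubset_iff c' comb).mpr (fun x hx => hc'.mem hx)⟩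
  · rintro (hdir | ⟨v, hvV, hvsub⟩)
    · refine ⟨comb.map (fun j => PySem.List.pyGetD vb j []), List.Sublist.refl _, ?_, ?_⟩
      · intro h
        have : comb = [] := by
          cases comb with
          | nil => rfl
          | cons x t => simp at h
        subst this; simp at hdir
      · rw [pvUnionAll_map, List.length_map]; exact hdir
    · rcases hV v hvV with ⟨hvne, hvdir⟩
      have hvcomb : v.Sublist comb :=
        pvSublist_of_subset_sorted comb v (hne.sublist hvne) (hne.sublist hc)
          ((PySem.Set.issubset_iff v comb).mp hvsub)
      refine ⟨v.map (fun j => PySem.List.pyGetD vb j []), hvcomb.map _, ?_, ?_⟩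
      · intro h
        have : v = [] := by
          cases v with
          | nil => rfl
          | cons x t => simp at h
        subst this; simp at hvdir
      · rw [pvUnionAll_map, List.length_map]; exact hvdir

-- one size's combination loop: A's fold and B's fold stay in lock-step
-- (states: A carries invalid_sets, B carries (invalid_sets, known, violators) with known = invalid_sets)
theorem pvFoldCombs (vb : List (List Int)) (ne : List Int) (hne : ne.Pairwise (· < ·)) (i : Nat) :
    ∀ (cs : List (List Int)), (∀ c ∈ cs, c.Sublist ne ∧ c.length = i) →
    ∀ (inv V : List (List Int)),
    (∀ v ∈ V, v.Sublist ne ∧ (pvUnionIdx vb v).length < v.length) →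
    (∀ c, c.Sublist ne → (pvUnionIdx vb c).length < c.length → c.length < i → c ∈ V) →
    (cs.foldl (fun invalid_sets combination =>
        if invalid_sets.contains (PySem.Set.ofList combination) then invalid_sets
        else if !bipartiteCover (combination.map (fun i => PySem.List.pyGetD vb i [])) then
          invalid_sets ++ [PySem.Set.ofList combination]
        else invalid_sets) inv
      = (cs.foldl (fun st2 comb =>
          let fs := PySem.Set.ofList comb
          let direct := decide ((pvUnionIdx vb comb).length < comb.length)
          let bad := direct || st2.2.2.any (fun v => PySem.Set.issubset v fs)
          let violators := if direct then st2.2.2 ++ [fs] else st2.2.2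
          if bad && !(st2.2.1.contains fs) then (st2.1 ++ [fs], st2.2.1 ++ [fs], violators)
          else (st2.1, st2.2.1, violators)) (inv, inv, V)).1)
    ∧ (cs.foldl (fun st2 comb =>
          let fs := PySem.Set.ofList comb
          let direct := decide ((pvUnionIdx vb comb).length < comb.length)
          let bad := direct || st2.2.2.any (fun v => PySem.Set.issubset v fs)
          let violators := if direct then st2.2.2 ++ [fs] else st2.2.2
          if bad && !(st2.2.1.contains fs) then (st2.1 ++ [fs], st2.2.1 ++ [fs], violators)
          else (st2.1, st2.2.1, violators)) (inv, inv, V)).2.1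
      = (cs.foldl (fun st2 comb =>
          let fs := PySem.Set.ofList comb
          let direct := decide ((pvUnionIdx vb comb).length < comb.length)
          let bad := direct || st2.2.2.any (fun v => PySem.Set.issubset v fs)
          let violators := if direct then st2.2.2 ++ [fs] else st2.2.2
          if bad && !(st2.2.1.contains fs) then (st2.1 ++ [fs], st2.2.1 ++ [fs], violators)
          else (st2.1, st2.2.1, violators)) (inv, inv, V)).1
    ∧ (cs.foldl (fun st2 comb =>
          let fs := PySem.Set.ofList comb
          let direct := decide ((pvUnionIdx vb comb).length < comb.length)
          let bad := direct || st2.2.2.any (fun v => PySem.Set.issubset v fs)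
          let violators := if direct then st2.2.2 ++ [fs] else st2.2.2
          if bad && !(st2.2.1.contains fs) then (st2.1 ++ [fs], st2.2.1 ++ [fs], violators)
          else (st2.1, st2.2.1, violators)) (inv, inv, V)).2.2
      = V ++ cs.filter (fun c => decide ((pvUnionIdx vb c).length < c.length)) := by
  intro cs
  induction cs with
  | nil => intro _ inv V _ _; simp
  | cons c cs ih =>
    intro hcs inv V hV hcomp
    obtain ⟨hcsub, hclen⟩ := hcs c List.mem_cons_self
    have hcnodup : c.Nodup := ((hne.sublist hcsub).imp (fun hlt => ne_of_lt hlt))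
    have hofc : PySem.Set.ofList c = c := PySem.Set.ofList_eq_self_of_nodup c hcnodup
    have hbad : (!bipartiteCover (c.map (fun i => PySem.List.pyGetD vb i [])))
        = (decide ((pvUnionIdx vb c).length < c.length) || V.any (fun v => PySem.Set.issubset v c)) := by
      rw [Bool.eq_iff_iff]
      simp only [Bool.not_eq_true', Bool.or_eq_true, decide_eq_true_eq, List.any_eq_true]
      exact pvBad_iff vb ne hne V i hV hcomp c hcsub hclen
    -- the per-element step of both folds, in closed form
    have hstep :
        ((fun st2 comb =>
          let fs := PySem.Set.ofList comb
          let direct := decide ((pvUnionIdx vb comb).length < comb.length)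
          let bad := direct || st2.2.2.any (fun v => PySem.Set.issubset v fs)
          let violators := if direct then st2.2.2 ++ [fs] else st2.2.2
          if bad && !(st2.2.1.contains fs) then (st2.1 ++ [fs], st2.2.1 ++ [fs], violators)
          else (st2.1, st2.2.1, violators))
          (inv, inv, V) c
          : List (List Int) × List (List Int) × List (List Int))
        = (((if inv.contains (PySem.Set.ofList c) then inv
              else if !bipartiteCover (c.map (fun i => PySem.List.pyGetD vb i [])) then
                inv ++ [PySem.Set.ofList c]
              else inv) : List (List Int)),
           (if inv.contains (PySem.Set.ofList c) then inv
              else if !bipartiteCover (c.map (fun i => PySem.List.pyGetD vb i [])) then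
                inv ++ [PySem.Set.ofList c]
              else inv),
           (if decide ((pvUnionIdx vb c).length < c.length) then V ++ [c] else V)) := by
      simp only [hofc, hbad]
      by_cases hcont : c ∈ inv
      · by_cases hdir : ((pvUnionIdx vb c).length < c.length) <;>
          simp [hcont, hdir]
      · by_cases hdir : ((pvUnionIdx vb c).length < c.length)
        · simp [hcont, hdir]
        · by_cases hany : V.any (fun v => PySem.Set.issubset v c) <;>
            simp [hcont, hdir, hany]
    simp only [List.foldl_cons, hstep]
    have hV' : ∀ v ∈ (if decide ((pvUnionIdx vb c).length < c.length) then V ++ [c] else V),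
        v.Sublist ne ∧ (pvUnionIdx vb v).length < v.length := by
      by_cases hdir : ((pvUnionIdx vb c).length < c.length)
      · simp only [hdir, decide_true, if_true]
        intro v hv
        rcases List.mem_append.mp hv with h | h
        · exact hV v h
        · simp at h; subst h; exact ⟨hcsub, hdir⟩
      · simp only [hdir, decide_false]; exact hV
    have hcomp' : ∀ c', c'.Sublist ne → (pvUnionIdx vb c').length < c'.length → c'.length < i →
        c' ∈ (if decide ((pvUnionIdx vb c).length < c.length) then V ++ [c] else V) := by
      intro c' h1 h2 h3
      by_cases hdir : ((pvUnionIdx vb c).length < c.length) <;>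
        simp [hdir, hcomp c' h1 h2 h3]
    obtain ⟨g1, g2, g3⟩ := ih (fun x hx => hcs x (List.mem_cons_of_mem _ hx)) _ _ hV' hcomp'
    refine ⟨g1, g2, ?_⟩
    rw [g3, List.filter_cons]
    by_cases hdir : ((pvUnionIdx vb c).length < c.length) <;> simp [hdir]

-- the loop over sizes a, a+1, …, a+k-1: both ports stay in lock-step
theorem pvFoldSizes (vb : List (List Int)) (ne : List Int) (hne : ne.Pairwise (· < ·)) :
    ∀ (k a : Nat) (inv V : List (List Int)),
    (∀ v ∈ V, v.Sublist ne ∧ (pvUnionIdx vb v).length < v.length) →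
    (∀ c, c.Sublist ne → (pvUnionIdx vb c).length < c.length → c.length < a → c ∈ V) →
    ((List.range' a k).foldl (fun invalid_sets i =>
        (PySem.List.combinations ne i).foldl (fun invalid_sets combination =>
          if invalid_sets.contains (PySem.Set.ofList combination) then invalid_sets
          else if !bipartiteCover (combination.map (fun i => PySem.List.pyGetD vb i [])) then
            invalid_sets ++ [PySem.Set.ofList combination]
          else invalid_sets) invalid_sets) inv
      = ((List.range' a k).foldl (fun st2 size =>
          (PySem.List.combinations ne size).foldl (fun st2 comb =>
            let fs := PySem.Set.ofList comb
            let direct := decide ((pvUnionIdx vb comb).length < comb.length)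
            let bad := direct || st2.2.2.any (fun v => PySem.Set.issubset v fs)
            let violators := if direct then st2.2.2 ++ [fs] else st2.2.2
            if bad && !(st2.2.1.contains fs) then (st2.1 ++ [fs], st2.2.1 ++ [fs], violators)
            else (st2.1, st2.2.1, violators)) st2) (inv, inv, V)).1)
    ∧ ((List.range' a k).foldl (fun st2 size =>
          (PySem.List.combinations ne size).foldl (fun st2 comb =>
            let fs := PySem.Set.ofList comb
            let direct := decide ((pvUnionIdx vb comb).length < comb.length)
            let bad := direct || st2.2.2.any (fun v => PySem.Set.issubset v fs)
            let violators := if direct then st2.2.2 ++ [fs] else st2.2.2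
            if bad && !(st2.2.1.contains fs) then (st2.1 ++ [fs], st2.2.1 ++ [fs], violators)
            else (st2.1, st2.2.1, violators)) st2) (inv, inv, V)).2.1
      = ((List.range' a k).foldl (fun st2 size =>
          (PySem.List.combinations ne size).foldl (fun st2 comb =>
            let fs := PySem.Set.ofList comb
            let direct := decide ((pvUnionIdx vb comb).length < comb.length)
            let bad := direct || st2.2.2.any (fun v => PySem.Set.issubset v fs)
            let violators := if direct then st2.2.2 ++ [fs] else st2.2.2
            if bad && !(st2.2.1.contains fs) then (st2.1 ++ [fs], st2.2.1 ++ [fs], violators)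
            else (st2.1, st2.2.1, violators)) st2) (inv, inv, V)).1 := by
  intro k
  induction k with
  | zero => intro a inv V _ _; simp
  | succ k ih =>
    intro a inv V hV hcomp
    have hcs : ∀ c ∈ PySem.List.combinations ne a, c.Sublist ne ∧ c.length = a := by
      intro c hc; exact (PySem.List.mem_combinations_iff ne a c).mp hc
    obtain ⟨h1, h2, h3⟩ := pvFoldCombs vb ne hne a (PySem.List.combinations ne a) hcs inv V hV hcomp
    have hrange : List.range' a (k+1) = a :: List.range' (a+1) k := by
      simp [List.range'_succ]
    rw [hrange]
    rw [List.foldl_cons, List.foldl_cons]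
    rcases hre : (PySem.List.combinations ne a).foldl (fun st2 comb =>
            let fs := PySem.Set.ofList comb
            let direct := decide ((pvUnionIdx vb comb).length < comb.length)
            let bad := direct || st2.2.2.any (fun v => PySem.Set.issubset v fs)
            let violators := if direct then st2.2.2 ++ [fs] else st2.2.2
            if bad && !(st2.2.1.contains fs) then (st2.1 ++ [fs], st2.2.1 ++ [fs], violators)
            else (st2.1, st2.2.1, violators)) (inv, inv, V) with ⟨x, y, z⟩
    rw [hre]
    rw [hre] at h1 h2 h3
    simp only at h1 h2 h3
    subst h2 h3
    rw [h1]
    set V2 := V ++ (PySem.List.combinations ne a).filter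
        (fun c => decide ((pvUnionIdx vb c).length < c.length)) with hV2
    have hV' : ∀ v ∈ V2, v.Sublist ne ∧ (pvUnionIdx vb v).length < v.length := by
      intro v hv
      rcases List.mem_append.mp hv with h | h
      · exact hV v h
      · obtain ⟨hm, hd⟩ := List.mem_filter.mp h
        exact ⟨(hcs v hm).1, of_decide_eq_true hd⟩
    have hcomp' : ∀ c, c.Sublist ne → (pvUnionIdx vb c).length < c.length → c.length < a + 1 →
        c ∈ V2 := by
      intro c hs hd hl
      by_cases hla : c.length < a
      · exact List.mem_append.mpr (Or.inl (hcomp c hs hd hla))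
      · have : c.length = a := by omega
        refine List.mem_append.mpr (Or.inr (List.mem_filter.mpr ⟨?_, decide_eq_true hd⟩))
        exact (PySem.List.mem_combinations_iff ne a c).mpr ⟨hs, this⟩
    exact ih (a+1) _ V2 hV' hcomp'

-- one timestep: A's body equals B's body (first two state components)
theorem pvTimeStep (vb : List (List Int)) (inv : List (List Int)) :
    (let nonempty_indices :=
      (PySem.List.pyRange 0 vb.length 1).filter
        (fun index => 0 < (PySem.List.pyGetD vb index []).length)
    ((List.range (nonempty_indices.length + 1)).foldl (fun invalid_sets i =>
        (PySem.List.combinations nonempty_indices i).foldl (fun invalid_sets combination =>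
          if invalid_sets.contains (PySem.Set.ofList combination) then invalid_sets
          else if !bipartiteCover (combination.map (fun i => PySem.List.pyGetD vb i [])) then
            invalid_sets ++ [PySem.Set.ofList combination]
          else invalid_sets) invalid_sets) inv
      = ((List.range (nonempty_indices.length + 1)).foldl (fun st2 size =>
          (PySem.List.combinations nonempty_indices size).foldl (fun st2 comb =>
            let fs := PySem.Set.ofList comb
            let direct := decide ((pvUnionIdx vb comb).length < comb.length)
            let bad := direct || st2.2.2.any (fun v => PySem.Set.issubset v fs)
            let violators := if direct then st2.2.2 ++ [fs] else st2.2.2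
            if bad && !(st2.2.1.contains fs) then (st2.1 ++ [fs], st2.2.1 ++ [fs], violators)
            else (st2.1, st2.2.1, violators)) st2) (inv, inv, ([] : List (List Int)))).1)
    ∧ ((List.range (nonempty_indices.length + 1)).foldl (fun st2 size =>
          (PySem.List.combinations nonempty_indices size).foldl (fun st2 comb =>
            let fs := PySem.Set.ofList comb
            let direct := decide ((pvUnionIdx vb comb).length < comb.length)
            let bad := direct || st2.2.2.any (fun v => PySem.Set.issubset v fs)
            let violators := if direct then st2.2.2 ++ [fs] else st2.2.2
            if bad && !(st2.2.1.contains fs) then (st2.1 ++ [fs], st2.2.1 ++ [fs], violators)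
            else (st2.1, st2.2.1, violators)) st2) (inv, inv, ([] : List (List Int)))).2.1
      = ((List.range (nonempty_indices.length + 1)).foldl (fun st2 size =>
          (PySem.List.combinations nonempty_indices size).foldl (fun st2 comb =>
            let fs := PySem.Set.ofList comb
            let direct := decide ((pvUnionIdx vb comb).length < comb.length)
            let bad := direct || st2.2.2.any (fun v => PySem.Set.issubset v fs)
            let violators := if direct then st2.2.2 ++ [fs] else st2.2.2
            if bad && !(st2.2.1.contains fs) then (st2.1 ++ [fs], st2.2.1 ++ [fs], violators)
            else (st2.1, st2.2.1, violators)) st2) (inv, inv, ([] : List (List Int)))).1) := by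
  intro nonempty_indices
  have hne : nonempty_indices.Pairwise (· < ·) :=
    (PySem.List.pairwise_lt_pyRange_one 0 vb.length).filter _
  have h := pvFoldSizes vb nonempty_indices hne (nonempty_indices.length + 1) 0 inv []
    (by intro v hv; simp at hv)
    (by intro c _ _ hl; omega)
  rw [List.range_eq_range']
  exact h

-- the outer loop over timesteps: a fold whose B-state is a pair with equal components
theorem pvFoldPair (fA : List (List Int) → List (List Int) → List (List Int))
    (fB : List (List Int) × List (List Int) → List (List Int) → List (List Int) × List (List Int))
    (hstep : ∀ inv x, fA inv x = (fB (inv, inv) x).1 ∧ (fB (inv, inv) x).2 = (fB (inv, inv) x).1) :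
    ∀ (l : List (List (List Int))) (inv : List (List Int)),
      l.foldl fA inv = (l.foldl fB (inv, inv)).1
      ∧ (l.foldl fB (inv, inv)).2 = (l.foldl fB (inv, inv)).1 := by
  intro l
  induction l with
  | nil => intro inv; exact ⟨rfl, rfl⟩
  | cons x l ih =>
    intro inv
    obtain ⟨h1, h2⟩ := hstep inv x
    have hx : fB (inv, inv) x = (fA inv x, fA inv x) := by
      apply Prod.ext
      · exact h1.symm
      · exact h2.trans h1.symm
    rw [List.foldl_cons, List.foldl_cons, hx]
    exact ih (fA inv x)

-- ===== VERDICT (by name: the statement is the Claim_ definition above) =====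
theorem findInvalidSets_spec : Claim_equal_findInvalidSets := by
  intro tvb _
  unfold Spec_findInvalidSets findInvalidSets findInvalidSets_alt
  exact (pvFoldPair _ _ (fun inv vb => pvTimeStep vb inv) tvb []).1
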